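-- pv_equiv track=rewrite | github.com/amalsameel/canary | canary/guard_shim.py | _extract_canary_flags
-- ===== SOURCE A (Python) =====
-- _IGNORE_FLAGS = {"-ignore", "--ignore"}
--
-- _SAFE_FLAGS = {"-safe", "--safe"}
--
-- def _extract_canary_flags(argv: list[str]) -> tuple[list[str], bool, bool]:
--     """Strip -ignore / -safe from argv; return (clean_argv, has_ignore, has_safe)."""
--     clean, has_ignore, has_safe = [], False, False
--     for arg in argv:
--         if arg in _IGNORE_FLAGS:
--             has_ignore = True
--         elif arg in _SAFE_FLAGS:
--             has_safe = True
--         else: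
--             clean.append(arg)
--     return clean, has_ignore, has_safe
-- ===== SOURCE B (Python) =====
-- _IGNORE_FLAGS = {"-ignore", "--ignore"}
--
-- _SAFE_FLAGS = {"-safe", "--safe"}
--
-- def _extract_canary_flags(argv: list[str]) -> tuple[list[str], bool, bool]:
--     """Strip -ignore / -safe from argv; return (clean_argv, has_ignore, has_safe)."""
--     clean = [a for a in argv if a not in _IGNORE_FLAGS and a not in _SAFE_FLAGS]
--     has_ignore = any(a in _IGNORE_FLAGS for a in argv)
--     has_safe = any(a in _SAFE_FLAGS for a in argv)
--     return clean, has_ignore, has_safe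
-- ===== Notes on version B (the rewrite author's own statement) =====
-- stated objective: simpler
-- what changed: Replaced the single fused accumulating loop (list + two mutable booleans) with three independent passes: a filter comprehension for clean and two any() scans for the flags.
import Mathlib
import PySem

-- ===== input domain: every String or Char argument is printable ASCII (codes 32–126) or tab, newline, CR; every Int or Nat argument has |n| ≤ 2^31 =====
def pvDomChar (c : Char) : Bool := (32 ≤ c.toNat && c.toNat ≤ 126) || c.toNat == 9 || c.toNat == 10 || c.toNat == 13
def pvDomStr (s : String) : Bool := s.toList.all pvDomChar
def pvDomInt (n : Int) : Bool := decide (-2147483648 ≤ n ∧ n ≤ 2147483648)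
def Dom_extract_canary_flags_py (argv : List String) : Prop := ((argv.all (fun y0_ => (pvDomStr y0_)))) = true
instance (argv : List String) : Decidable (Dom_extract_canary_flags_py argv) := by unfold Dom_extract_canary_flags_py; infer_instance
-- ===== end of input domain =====

-- B replaces A's single fused accumulating loop with three independent passes
-- (a filter for clean and two any-scans for the flags): simpler decomposition, same cost.

-- ===== PORT A =====
-- the module-level flag sets
def pvIgnoreFlags : PySem.Set String := PySem.Set.ofList ["-ignore", "--ignore"]
def pvSafeFlags : PySem.Set String := PySem.Set.ofList ["-safe", "--safe"]

-- A: one loop accumulating (clean, has_ignore, has_safe)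
def extract_canary_flags_py (argv : List String) : List String × Bool × Bool :=
  argv.foldl
    (fun st arg =>
      let (clean, has_ignore, has_safe) := st
      if PySem.Set.contains pvIgnoreFlags arg then (clean, true, has_safe)
      else if PySem.Set.contains pvSafeFlags arg then (clean, has_ignore, true)
      else (clean ++ [arg], has_ignore, has_safe))
    ([], false, false)

-- ===== PORT B =====
-- B: three independent passes
def extract_canary_flags_py_alt (argv : List String) : List String × Bool × Bool :=
  let clean := argv.filter (fun a => !PySem.Set.contains pvIgnoreFlags a && !PySem.Set.contains pvSafeFlags a)
  let has_ignore := argv.any (fun a => PySem.Set.contains pvIgnoreFlags a)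
  let has_safe := argv.any (fun a => PySem.Set.contains pvSafeFlags a)
  (clean, has_ignore, has_safe)

-- ===== PRECONDITION & SPEC =====
def Spec_extract_canary_flags_py (argv : List String) (out : List String × Bool × Bool) : Prop := out = extract_canary_flags_py_alt argv
instance (argv : List String) (out : List String × Bool × Bool) : Decidable (Spec_extract_canary_flags_py argv out) := by unfold Spec_extract_canary_flags_py; infer_instance

-- ===== CLAIM (what is proved, stated in full; the proofs are below) =====
def Claim_equal_extract_canary_flags_py : Prop := ∀ (argv : List String), Dom_extract_canary_flags_py argv → Spec_extract_canary_flags_py argv (extract_canary_flags_py argv)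

-- ===== LEMMAS AND PROOFS =====
-- loop invariant: A's fold from any accumulator equals the accumulator extended by B's three passes
theorem extract_canary_flags_fold (argv : List String) (clean : List String) (hi hs : Bool) :
    argv.foldl
      (fun st arg =>
        let (clean, has_ignore, has_safe) := st
        if PySem.Set.contains pvIgnoreFlags arg then (clean, true, has_safe)
        else if PySem.Set.contains pvSafeFlags arg then (clean, has_ignore, true)
        else (clean ++ [arg], has_ignore, has_safe))
      (clean, hi, hs)
    = (clean ++ argv.filter (fun a => !PySem.Set.contains pvIgnoreFlags a && !PySem.Set.contains pvSafeFlags a),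
       hi || argv.any (fun a => PySem.Set.contains pvIgnoreFlags a),
       hs || argv.any (fun a => PySem.Set.contains pvSafeFlags a)) := by
  induction argv generalizing clean hi hs with
  | nil => simp
  | cons a t ih =>
    simp only [List.foldl_cons, List.filter_cons, List.any_cons]
    by_cases h1 : a ∈ pvIgnoreFlags
    · have hns : ¬ a ∈ pvSafeFlags := by
        have h2 := h1
        simp [pvIgnoreFlags, PySem.Set.ofList] at h2
        rcases h2 with rfl | rfl <;> decide
      rw [if_pos (by simpa using h1), ih]
      simp [h1, hns]
    · by_cases h2 : a ∈ pvSafeFlags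
      · rw [if_neg (by simpa using h1), if_pos (by simpa using h2), ih]
        simp [h1, h2]
      · rw [if_neg (by simpa using h1), if_neg (by simpa using h2), ih]
        simp [h1, h2]

-- ===== VERDICT (by name: the statement is the Claim_ definition above) =====
theorem extract_canary_flags_py_spec : Claim_equal_extract_canary_flags_py := by
  intro argv _
  unfold Spec_extract_canary_flags_py extract_canary_flags_py extract_canary_flags_py_alt
  simpa using extract_canary_flags_fold argv [] false false
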